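-- pv_equiv track=rewrite | github.com/Sayan-01/AgriMind | apps/ml-inference/test_accuracy.py | find_closest_class
-- ===== SOURCE A (Python) =====
-- def find_closest_class(true_label, class_names):
--     """Find the closest matching class name"""
--     true_lower = true_label.lower()
--
--     # Direct matches
--     for class_name in class_names:
--         if true_lower in class_name.lower() or class_name.lower() in true_lower:
--             return class_name
--
--     # Partial matches
--     for class_name in class_names:
--         if any(word in class_name.lower() for word in true_lower.split('_')):
--             return class_name
--
--     return None
-- ===== SOURCE B (Python) =====
-- def find_closest_class(true_label, class_names):
--     """Find the closest matching class name (single fused pass)."""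
--     true_lower = true_label.lower()
--     words = true_lower.split('_')
--     candidate = None
--     for class_name in class_names:
--         cl = class_name.lower()
--         if true_lower in cl or cl in true_lower:
--             return class_name
--         if candidate is None and any(word in cl for word in words):
--             candidate = class_name
--     return candidate
-- ===== Notes on version B (the rewrite author's own statement) =====
-- stated objective: faster
-- what changed: Fuses A's two sequential scans (direct matches, then partial matches) into one pass that returns a direct match immediately and keeps the first word-match as a fallback accumulator, also lowercasing each class name once per element and splitting the label once.
import Mathlib
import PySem

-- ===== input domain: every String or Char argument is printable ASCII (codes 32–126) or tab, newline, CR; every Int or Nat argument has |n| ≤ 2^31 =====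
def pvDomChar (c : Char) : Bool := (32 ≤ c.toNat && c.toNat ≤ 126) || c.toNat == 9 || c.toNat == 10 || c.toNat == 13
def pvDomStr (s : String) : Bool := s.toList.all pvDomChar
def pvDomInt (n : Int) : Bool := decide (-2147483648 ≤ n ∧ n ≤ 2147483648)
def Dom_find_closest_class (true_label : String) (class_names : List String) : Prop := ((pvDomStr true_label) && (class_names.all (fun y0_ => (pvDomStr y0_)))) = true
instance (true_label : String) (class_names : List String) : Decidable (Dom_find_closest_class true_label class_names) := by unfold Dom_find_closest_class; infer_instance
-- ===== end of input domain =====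

-- B fuses A's two sequential scans into one pass: direct matches return immediately,
-- the first word-match is kept as a fallback accumulator (objective: faster, constant factor).

-- ===== PORT A =====
-- A: first loop — return the first direct (substring either way) match
def fccDirect (true_lower : String) : List String → Option String
  | [] => none
  | class_name :: rest =>
    if PySem.Str.isIn true_lower (PySem.Str.lower class_name)
        || PySem.Str.isIn (PySem.Str.lower class_name) true_lower then some class_name
    else fccDirect true_lower rest

-- A: second loop — return the first class whose lowercase contains some word of true_lower
def fccPartial (true_lower : String) : List String → Option String
  | [] => none
  | class_name :: rest =>
    if (PySem.Chars.splitOn true_lower.toList ['_']).any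
        (fun word => PySem.Chars.isIn word (PySem.Str.lower class_name).toList) then some class_name
    else fccPartial true_lower rest

def find_closest_class (true_label : String) (class_names : List String) : Option String :=
  let true_lower := PySem.Str.lower true_label
  match fccDirect true_lower class_names with
  | some c => some c
  | none => fccPartial true_lower class_names

-- ===== PORT B =====
-- B: one pass with a fallback accumulator `cand`
def fccAltLoop (true_lower : String) (words : List (List Char)) :
    List String → Option String → Option String
  | [], cand => cand
  | class_name :: rest, cand =>
    let cl := PySem.Str.lower class_name
    if PySem.Str.isIn true_lower cl || PySem.Str.isIn cl true_lower then some class_name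
    else fccAltLoop true_lower words rest
      (if cand.isNone && words.any (fun word => PySem.Chars.isIn word cl.toList) then some class_name
       else cand)

def find_closest_class_alt (true_label : String) (class_names : List String) : Option String :=
  let true_lower := PySem.Str.lower true_label
  let words := PySem.Chars.splitOn true_lower.toList ['_']
  fccAltLoop true_lower words class_names none

-- ===== PRECONDITION & SPEC =====
def Spec_find_closest_class (true_label : String) (class_names : List String) (out : Option String) : Prop := out = find_closest_class_alt true_label class_names
instance (true_label : String) (class_names : List String) (out : Option String) : Decidable (Spec_find_closest_class true_label class_names out) := by unfold Spec_find_closest_class; infer_instance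

-- ===== CLAIM (what is proved, stated in full; the proofs are below) =====
def Claim_equal_find_closest_class : Prop := ∀ (true_label : String) (class_names : List String), Dom_find_closest_class true_label class_names → Spec_find_closest_class true_label class_names (find_closest_class true_label class_names)

-- ===== LEMMAS AND PROOFS =====
-- The fused loop equals: first direct match, else the accumulator, else the first partial match.
theorem fccAltLoop_eq (tl : String) (cns : List String) (cand : Option String) :
    fccAltLoop tl (PySem.Chars.splitOn tl.toList ['_']) cns cand =
      match fccDirect tl cns with
      | some c => some c
      | none => cand.or (fccPartial tl cns) := by
  induction cns generalizing cand with
  | nil => simp [fccAltLoop, fccDirect, fccPartial]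
  | cons c rest ih =>
    unfold fccAltLoop fccDirect fccPartial
    by_cases hd : (PySem.Str.isIn tl (PySem.Str.lower c)
        || PySem.Str.isIn (PySem.Str.lower c) tl) = true
    · rw [if_pos hd, if_pos hd]
    · rw [if_neg hd, if_neg hd, ih]
      cases hfd : fccDirect tl rest with
      | some x => rfl
      | none =>
        cases cand with
        | some x => rfl
        | none =>
          by_cases hq : ((PySem.Chars.splitOn tl.toList ['_']).any
              (fun word => PySem.Chars.isIn word (PySem.Str.lower c).toList)) = true
          · rw [if_pos (by simpa using hq), if_pos hq]
            simp
          · rw [if_neg (by simpa using hq), if_neg hq]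

-- ===== VERDICT (by name: the statement is the Claim_ definition above) =====
theorem find_closest_class_spec : Claim_equal_find_closest_class := by
  intro tl cns _
  unfold Spec_find_closest_class find_closest_class find_closest_class_alt
  rw [fccAltLoop_eq]
  cases h : fccDirect (PySem.Str.lower tl) cns <;> simp [h]
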